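-- pv_equiv track=rewrite | github.com/josalhor/hermax | tests/core/test_ipamir_solver_hardcore.py | all_assignments
-- ===== SOURCE A (Python) =====
-- from typing import List, Tuple, Optional, Dict, Iterable, Callable, Any
--
-- def all_assignments(vars_: List[int]) -> Iterable[List[int]]:
--     """
--     Enumerate all ± assignments as model lists with signed ints.
--     """
--     n = len(vars_)
--     for mask in range(1 << n):
--         m = []
--         for i, v in enumerate(vars_):
--             bit = (mask >> i) & 1
--             m.append(v if bit else -v)
--         yield m
-- ===== SOURCE B (Python) =====
-- def all_assignments(vars_):
--     """
--     Enumerate all +/- assignments as model lists with signed ints.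
--     Recursive over the list structure: the head variable toggles fastest,
--     negative before positive, matching the mask enumeration order.
--     """
--     if not vars_:
--         yield []
--         return
--     v = vars_[0]
--     for tail in all_assignments(vars_[1:]):
--         yield [-v] + tail
--         yield [v] + tail
-- ===== Notes on version B (the rewrite author's own statement) =====
-- stated objective: alternative
-- what changed: Replaced the 2^n integer-mask loop with bit extraction per index by a recursive generator over the list structure that prefixes -v then v to each recursively enumerated tail (head variable toggling fastest).
import Mathlib
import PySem

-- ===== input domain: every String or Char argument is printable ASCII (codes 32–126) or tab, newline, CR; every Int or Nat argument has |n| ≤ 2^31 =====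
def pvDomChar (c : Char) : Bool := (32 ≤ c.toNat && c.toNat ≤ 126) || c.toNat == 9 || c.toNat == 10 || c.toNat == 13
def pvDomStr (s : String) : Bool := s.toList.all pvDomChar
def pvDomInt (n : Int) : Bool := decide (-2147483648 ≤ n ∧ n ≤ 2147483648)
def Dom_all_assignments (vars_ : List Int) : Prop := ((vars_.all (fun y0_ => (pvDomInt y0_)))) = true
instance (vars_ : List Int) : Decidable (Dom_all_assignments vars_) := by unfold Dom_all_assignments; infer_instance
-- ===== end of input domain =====

-- B replaces A's 2^n integer-mask loop by structural recursion over the list (head toggles fastest, negative first): objective 'alternative'.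

-- ===== PORT A =====
-- mask ranges over range(1 << n), so mask ≥ 0 and the enumerate index i ≥ 0:
-- '.toNat' on them is exact, and '(mask >> i) & 1' is Nat shiftRight/and.
def all_assignments (vars_ : List Int) : List (List Int) :=
  let n := vars_.length
  (PySem.List.pyRange 0 ((2 : Int) ^ n) 1).map (fun mask =>
    (PySem.List.enumerate vars_).foldl (fun m p =>
      let bit : Nat := (mask.toNat >>> p.1.toNat) &&& 1
      m ++ [if bit ≠ 0 then p.2 else -p.2]) [])

-- ===== PORT B =====
def all_assignments_alt : List Int → List (List Int)
  | [] => [[]]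
  | v :: vs => (all_assignments_alt vs).flatMap (fun tail => [(-v) :: tail, v :: tail])

-- ===== PRECONDITION & SPEC =====
def Spec_all_assignments (vars_ : List Int) (out : List (List Int)) : Prop := out = all_assignments_alt vars_
instance (vars_ : List Int) (out : List (List Int)) : Decidable (Spec_all_assignments vars_ out) := by unfold Spec_all_assignments; infer_instance

-- ===== CLAIM (what is proved, stated in full; the proofs are below) =====
def Claim_equal_all_assignments : Prop := ∀ (vars_ : List Int), Dom_all_assignments vars_ → Spec_all_assignments vars_ (all_assignments vars_)

-- ===== LEMMAS AND PROOFS =====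

/-- The row A builds for a given mask, read off bit by bit. -/
def pvBits : List Int → Nat → List Int
  | [], _ => []
  | v :: vs, m => (if m &&& 1 ≠ 0 then v else -v) :: pvBits vs (m >>> 1)

theorem pv_foldl_append {α β : Type} (f : α → β) :
    ∀ (l : List α) (acc : List β),
      l.foldl (fun m p => m ++ [f p]) acc = acc ++ l.map f := by
  intro l
  induction l with
  | nil => simp
  | cons x xs ih => intro acc; simp [List.foldl, ih]

theorem pv_row (m : Nat) :
    ∀ (vs : List Int) (s : Nat),
      (PySem.List.enumerate vs (s : Int)).map
        (fun p => if (m >>> p.1.toNat) &&& 1 ≠ 0 then p.2 else -p.2)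
      = pvBits vs (m >>> s) := by
  intro vs
  induction vs with
  | nil => intro s; simp [PySem.List.enumerate_nil, pvBits]
  | cons v vs ih =>
    intro s
    rw [PySem.List.enumerate_cons]
    simp only [List.map_cons, pvBits]
    have hhead : ((s : Int)).toNat = s := by simp
    rw [hhead]
    congr 1
    have h1 : ((s : Int) + 1) = ((s + 1 : Nat) : Int) := by push_cast; ring
    have h2 : m >>> (s + 1) = m >>> s >>> 1 := by
      simp [Nat.shiftRight_succ]
    rw [h1, ih (s + 1), h2]

theorem pv_range_double : ∀ (N : Nat),
    List.range (2 * N) = (List.range N).flatMap (fun k => [2 * k, 2 * k + 1]) := by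
  intro N
  induction N with
  | zero => simp
  | succ N ih =>
    have h : 2 * (N + 1) = (2 * N) + 1 + 1 := by ring
    rw [h, List.range_succ, List.range_succ, List.range_succ, ih]
    simp

theorem pv_bits_even (v : Int) (vs : List Int) (k : Nat) :
    pvBits (v :: vs) (2 * k) = (-v) :: pvBits vs k := by
  have h1 : (2 * k) &&& 1 = 0 := by simp [Nat.and_one_is_mod]
  have h2 : (2 * k) >>> 1 = k := by simp [Nat.shiftRight_one]
  simp [pvBits, h1, h2]

theorem pv_bits_odd (v : Int) (vs : List Int) (k : Nat) :
    pvBits (v :: vs) (2 * k + 1) = v :: pvBits vs k := by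
  have h1 : (2 * k + 1) &&& 1 = 1 := by simp [Nat.and_one_is_mod]
  have h2 : (2 * k + 1) >>> 1 = k := by simp [Nat.shiftRight_one]; omega
  simp [pvBits, h1, h2]

theorem pv_A_eq_map_bits (vs : List Int) :
    all_assignments vs = (List.range (2 ^ vs.length)).map (pvBits vs) := by
  dsimp only [all_assignments]
  rw [PySem.List.pyRange_one]
  have hn : (((2 : Int) ^ vs.length) - 0).toNat = 2 ^ vs.length := by
    simp; rfl
  rw [hn, List.map_map]
  apply List.map_congr_left
  intro k _
  simp only [Function.comp]
  rw [pv_foldl_append, List.nil_append]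
  simp only [zero_add, Int.toNat_natCast]
  have h := pv_row k vs 0
  simp only [Nat.cast_zero, Nat.shiftRight_zero] at h
  exact h

theorem pv_map_bits_eq_alt : ∀ (vs : List Int),
    (List.range (2 ^ vs.length)).map (pvBits vs) = all_assignments_alt vs := by
  intro vs
  induction vs with
  | nil => simp [pvBits, all_assignments_alt]
  | cons v vs ih =>
    have h : 2 ^ (v :: vs).length = 2 * 2 ^ vs.length := by
      simp [List.length_cons, pow_succ]; ring
    rw [h, pv_range_double, List.map_flatMap, all_assignments_alt, ← ih, List.flatMap_map]
    apply List.flatMap_congr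
    intro k _
    simp [pv_bits_even, pv_bits_odd]

-- ===== VERDICT (by name: the statement is the Claim_ definition above) =====
theorem all_assignments_spec : Claim_equal_all_assignments := by
  intro vs _
  unfold Spec_all_assignments
  rw [pv_A_eq_map_bits, pv_map_bits_eq_alt]
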